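-- pv_equiv track=rewrite | github.com/dustoff06/CDEF | examples/run_demo.py | _alt_extreme_pattern
-- ===== SOURCE A (Python) =====
-- def _alt_extreme_pattern(n_teams: int) -> list[int]:
--     """Alternate top and bottom ranks: 1, n, 2, n-1, ..."""
--     pattern = []
--     for i in range(n_teams // 2):
--         pattern.append(i + 1)          # top
--         pattern.append(n_teams - i)    # bottom
--     if n_teams % 2 == 1:
--         pattern.append(n_teams // 2 + 1)
--     return pattern
-- ===== SOURCE B (Python) =====
-- def _alt_extreme_pattern(n_teams: int) -> list[int]:
--     """Alternate top and bottom ranks: 1, n, 2, n-1, ..."""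
--     return [k // 2 + 1 if k % 2 == 0 else n_teams - k // 2
--             for k in range(n_teams)]
-- ===== Notes on version B (the rewrite author's own statement) =====
-- stated objective: simpler
-- what changed: Replaces A's half-count interleaving loop plus odd-tail branch by a single comprehension over range(n_teams) that computes each position's value from its index by a closed formula (k//2+1 at even positions, n-k//2 at odd positions).
-- intended difference: For negative odd n_teams A's leftover odd-tail branch fires and it returns the meaningless singleton [n_teams//2+1], while B returns the empty pattern, which is the intended value since there are no teams. — e.g. on _alt_extreme_pattern(-1): A returns [0], B returns []
import Mathlib
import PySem

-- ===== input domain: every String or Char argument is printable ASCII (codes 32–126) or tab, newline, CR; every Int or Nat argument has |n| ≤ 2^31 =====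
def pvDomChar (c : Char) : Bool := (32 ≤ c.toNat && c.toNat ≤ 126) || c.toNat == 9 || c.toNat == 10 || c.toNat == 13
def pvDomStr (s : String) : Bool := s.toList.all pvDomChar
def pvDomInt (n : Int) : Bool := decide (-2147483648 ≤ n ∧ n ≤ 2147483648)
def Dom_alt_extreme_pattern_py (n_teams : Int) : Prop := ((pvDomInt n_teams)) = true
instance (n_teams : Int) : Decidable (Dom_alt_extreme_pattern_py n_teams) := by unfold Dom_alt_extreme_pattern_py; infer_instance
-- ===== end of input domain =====

-- B replaces A's half-count interleaving loop + odd-tail branch by one positional closed-form comprehension over range(n) (objective: simpler).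

-- ===== PORT A =====
def alt_extreme_pattern_py (n_teams : Int) : List Int :=
  let pattern :=
    (PySem.List.pyRange 0 (PySem.Int.floordiv n_teams 2) 1).foldl
      (fun acc i => (acc ++ [i + 1]) ++ [n_teams - i]) []
  if PySem.Int.mod n_teams 2 = 1 then pattern ++ [PySem.Int.floordiv n_teams 2 + 1]
  else pattern

-- ===== PORT B =====
def alt_extreme_pattern_py_alt (n_teams : Int) : List Int :=
  (PySem.List.pyRange 0 n_teams 1).map (fun k =>
    if PySem.Int.mod k 2 = 0 then PySem.Int.floordiv k 2 + 1
    else n_teams - PySem.Int.floordiv k 2)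

-- ===== PRECONDITION & SPEC =====
-- For negative odd n_teams A's leftover odd-tail branch fires and it returns the meaningless
-- singleton [n_teams//2+1], while B returns the empty pattern, the intended value (no teams).
def D_alt_extreme_pattern_py (n_teams : Int) : Prop := n_teams < 0 ∧ n_teams % 2 ≠ 0
instance (n_teams : Int) : Decidable (D_alt_extreme_pattern_py n_teams) := by unfold D_alt_extreme_pattern_py; infer_instance
def Spec_alt_extreme_pattern_py (n_teams : Int) (out : List Int) : Prop := ¬ D_alt_extreme_pattern_py n_teams → out = alt_extreme_pattern_py_alt n_teams
instance (n_teams : Int) (out : List Int) : Decidable (Spec_alt_extreme_pattern_py n_teams out) := by unfold Spec_alt_extreme_pattern_py; infer_instance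
def pvDiffWitness_alt_extreme_pattern_py : Int := (-1)
def pvDiffWitnessOut_alt_extreme_pattern_py : (List Int) × (List Int) := ([0], [])

-- ===== CLAIM (what is proved, stated in full; the proofs are below) =====
def Claim_unchanged_alt_extreme_pattern_py : Prop := ∀ (n_teams : Int), Dom_alt_extreme_pattern_py n_teams → Spec_alt_extreme_pattern_py n_teams (alt_extreme_pattern_py n_teams)
def Claim_changed_alt_extreme_pattern_py : Prop := Dom_alt_extreme_pattern_py (pvDiffWitness_alt_extreme_pattern_py) ∧ D_alt_extreme_pattern_py (pvDiffWitness_alt_extreme_pattern_py) ∧ alt_extreme_pattern_py (pvDiffWitness_alt_extreme_pattern_py) = pvDiffWitnessOut_alt_extreme_pattern_py.1 ∧ alt_extreme_pattern_py_alt (pvDiffWitness_alt_extreme_pattern_py) = pvDiffWitnessOut_alt_extreme_pattern_py.2 ∧ pvDiffWitnessOut_alt_extreme_pattern_py.1 ≠ pvDiffWitnessOut_alt_extreme_pattern_py.2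
def Claim_exact_alt_extreme_pattern_py : Prop := ∀ (n_teams : Int), Dom_alt_extreme_pattern_py n_teams → D_alt_extreme_pattern_py n_teams → alt_extreme_pattern_py n_teams ≠ alt_extreme_pattern_py_alt n_teams

-- ===== LEMMAS AND PROOFS =====

-- B's formula evaluated on the Nat index k, as plain Nat arithmetic
theorem pv_formula (n : Int) (k : Nat) :
    (if PySem.Int.mod (k : Int) 2 = 0 then PySem.Int.floordiv (k : Int) 2 + 1
     else n - PySem.Int.floordiv (k : Int) 2)
    = (if k % 2 = 0 then ((k / 2 : Nat) : Int) + 1 else n - ((k / 2 : Nat) : Int)) := by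
  have h1 : PySem.Int.mod (k : Int) 2 = ((k % 2 : Nat) : Int) :=
    PySem.Int.mod_natCast k 2
  have h2 : PySem.Int.floordiv (k : Int) 2 = ((k / 2 : Nat) : Int) :=
    PySem.Int.floordiv_natCast k 2
  rw [h1, h2]
  by_cases h : k % 2 = 0 <;> simp [h] <;> omega

-- core: A's interleaving foldl over range m equals B's positional map over range (2m)
theorem pv_core (n : Int) (m : Nat) :
    ((List.range m).map (fun j : Nat => (j : Int))).foldl
        (fun acc i => (acc ++ [i + 1]) ++ [n - i]) []
    = (List.range (2 * m)).map
        (fun k => if k % 2 = 0 then ((k / 2 : Nat) : Int) + 1 else n - ((k / 2 : Nat) : Int)) := by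
  induction m with
  | zero => simp
  | succ m ih =>
      have h2m : 2 * (m + 1) = 2 * m + 1 + 1 := by omega
      rw [List.range_succ, h2m, List.range_succ, List.range_succ]
      simp only [List.map_append, List.foldl_append, List.map_cons, List.map_nil, ← ih]
      simp only [List.foldl_cons, List.foldl_nil, List.append_assoc]
      congr 1
      have he : (2 * m) % 2 = 0 := by omega
      have ho : (2 * m + 1) % 2 ≠ 0 := by omega
      have e1 : (2 * m) / 2 = m := by omega
      have e2 : (2 * m + 1) / 2 = m := by omega
      rw [if_pos he, if_neg ho, e1, e2]

theorem pv_eq_of_not_D (n : Int) (h : ¬ D_alt_extreme_pattern_py n) :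
    alt_extreme_pattern_py n = alt_extreme_pattern_py_alt n := by
  unfold D_alt_extreme_pattern_py at h
  push_neg at h
  unfold alt_extreme_pattern_py alt_extreme_pattern_py_alt
  by_cases hn : n < 0
  · -- n negative and even: both sides empty
    have heven : n % 2 = 0 := h hn
    have hfde : PySem.Int.floordiv n 2 = n / 2 :=
      PySem.Int.floordiv_eq_ediv_of_pos (by omega)
    have hme : PySem.Int.mod n 2 = n % 2 :=
      PySem.Int.mod_eq_emod_of_pos (by omega)
    have hA : PySem.List.pyRange 0 (PySem.Int.floordiv n 2) 1 = [] :=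
      PySem.List.pyRange_one_eq_nil (by omega)
    have hB : PySem.List.pyRange 0 n 1 = [] :=
      PySem.List.pyRange_one_eq_nil (by omega)
    rw [hA, hB]
    simp [hme, heven]
  · -- n ≥ 0
    push_neg at hn
    obtain ⟨N, rfl⟩ : ∃ N : Nat, n = (N : Int) := ⟨n.toNat, by omega⟩
    have hfd : PySem.Int.floordiv (N : Int) 2 = ((N / 2 : Nat) : Int) :=
      PySem.Int.floordiv_natCast N 2
    have hmod : PySem.Int.mod (N : Int) 2 = ((N % 2 : Nat) : Int) :=
      PySem.Int.mod_natCast N 2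
    have hrA : PySem.List.pyRange 0 (PySem.Int.floordiv (N : Int) 2) 1
        = (List.range (N / 2)).map (fun j : Nat => (j : Int)) := by
      rw [hfd, PySem.List.pyRange_one]
      have ht : ((((N / 2 : Nat) : Int)) - 0).toNat = N / 2 := by omega
      rw [ht]; simp
    have hrB : PySem.List.pyRange 0 (N : Int) 1
        = (List.range N).map (fun j : Nat => (j : Int)) := by
      rw [PySem.List.pyRange_one]
      have ht : (((N : Int)) - 0).toNat = N := by omega
      rw [ht]; simp
    rw [hrA, hrB, pv_core]
    have hmap : ((List.range N).map (fun j : Nat => (j : Int))).map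
        (fun k => if PySem.Int.mod k 2 = 0 then PySem.Int.floordiv k 2 + 1
                  else (N : Int) - PySem.Int.floordiv k 2)
        = (List.range N).map
            (fun k : Nat => if k % 2 = 0 then ((k / 2 : Nat) : Int) + 1
                            else (N : Int) - ((k / 2 : Nat) : Int)) := by
      rw [List.map_map]
      exact List.map_congr_left (fun k _ => pv_formula (N : Int) k)
    rw [hmap, hmod]
    by_cases hpar : N % 2 = 0
    · have hne : ((N % 2 : Nat) : Int) ≠ 1 := by omega
      rw [if_neg hne]
      have h2 : 2 * (N / 2) = N := by omega
      rw [h2]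
    · have hm1 : ((N % 2 : Nat) : Int) = 1 := by omega
      rw [if_pos hm1, hfd]
      have h2 : N = 2 * (N / 2) + 1 := by omega
      conv_rhs => rw [h2, List.range_succ]
      rw [List.map_append]
      congr 1
      · rw [← h2]
      · have he : (2 * (N / 2)) % 2 = 0 := by omega
        have hq : (2 * (N / 2)) / 2 = N / 2 := by omega
        simp only [List.map_cons, List.map_nil]
        rw [if_pos he, hq]

theorem pv_alt_empty_of_neg (n : Int) (hn : n < 0) : alt_extreme_pattern_py_alt n = [] := by
  unfold alt_extreme_pattern_py_alt
  rw [PySem.List.pyRange_one_eq_nil (by omega)]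
  rfl

-- ===== VERDICT (by name: the statement is the Claim_ definition above) =====
theorem alt_extreme_pattern_py_spec : Claim_unchanged_alt_extreme_pattern_py := by
  intro n _ hD
  exact pv_eq_of_not_D n hD

theorem alt_extreme_pattern_py_changed : Claim_changed_alt_extreme_pattern_py := by
  unfold Claim_changed_alt_extreme_pattern_py; decide

theorem alt_extreme_pattern_py_tight : Claim_exact_alt_extreme_pattern_py := by
  intro n _ hD
  obtain ⟨hn, hodd⟩ := hD
  rw [pv_alt_empty_of_neg n hn]
  unfold alt_extreme_pattern_py
  have hfde : PySem.Int.floordiv n 2 = n / 2 :=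
    PySem.Int.floordiv_eq_ediv_of_pos (by omega)
  have hme : PySem.Int.mod n 2 = n % 2 :=
    PySem.Int.mod_eq_emod_of_pos (by omega)
  rw [PySem.List.pyRange_one_eq_nil (by omega)]
  have h1 : PySem.Int.mod n 2 = 1 := by omega
  rw [if_pos h1]
  simp
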